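-- pv_equiv track=rewrite | github.com/StaceyFoxx/devops-mini-project | Foundation/32_Coding_Practice_Exam_Prep/practice_answers.py | even_difference
-- ===== SOURCE A (Python) =====
-- def even_difference(nums):
--     evens = []
--     for n in nums:
--         if n % 2 == 0:
--             evens.append(n)
--     if len(evens) < 2:
--         return 0
--     return max(evens) - min(evens)
-- ===== SOURCE B (Python) =====
-- def even_difference(nums):
--     count = 0
--     best = 0
--     worst = 0
--     for n in nums:
--         if n % 2 != 0:
--             continue
--         if count == 0:
--             best = n
--             worst = n
--         else:
--             best = max(best, n)
--             worst = min(worst, n)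
--         count += 1
--     if count < 2:
--         return 0
--     return best - worst
-- ===== Notes on version B (the rewrite author's own statement) =====
-- stated objective: alternative
-- what changed: Replaced the intermediate evens list plus two separate max/min scans by a single pass that maintains a count and running best/worst, initialised at the first even number.
import Mathlib
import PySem

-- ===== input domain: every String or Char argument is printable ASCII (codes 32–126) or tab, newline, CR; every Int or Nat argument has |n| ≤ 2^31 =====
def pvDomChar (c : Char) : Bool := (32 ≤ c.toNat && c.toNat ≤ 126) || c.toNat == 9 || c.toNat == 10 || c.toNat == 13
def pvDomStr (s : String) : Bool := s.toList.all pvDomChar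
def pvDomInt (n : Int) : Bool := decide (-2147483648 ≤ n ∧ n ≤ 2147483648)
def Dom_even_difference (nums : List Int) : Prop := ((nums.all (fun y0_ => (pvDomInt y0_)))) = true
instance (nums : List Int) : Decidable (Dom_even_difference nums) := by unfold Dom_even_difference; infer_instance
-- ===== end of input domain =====

-- B replaces A's intermediate evens list and its two separate max/min scans by one pass keeping a count and running best/worst (objective: alternative).

-- ===== PORT A =====
def pvStepA (acc : List Int) (n : Int) : List Int :=
  if PySem.Int.mod n 2 == 0 then acc ++ [n] else acc

def even_difference (nums : List Int) : Int :=
  let evens := nums.foldl pvStepA []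
  if evens.length < 2 then 0
  else (PySem.List.max? evens (fun x => x)).getD 0 - (PySem.List.min? evens (fun x => x)).getD 0

-- ===== PORT B =====
-- state = (count, best, worst)
def pvStepB (st : Int × Int × Int) (n : Int) : Int × Int × Int :=
  if PySem.Int.mod n 2 != 0 then st
  else if st.1 == 0 then (1, n, n)
  else (st.1 + 1, max st.2.1 n, min st.2.2 n)

def even_difference_alt (nums : List Int) : Int :=
  let st := nums.foldl pvStepB (0, 0, 0)
  if st.1 < 2 then 0 else st.2.1 - st.2.2

-- ===== PRECONDITION & SPEC =====
def Spec_even_difference (nums : List Int) (out : Int) : Prop := out = even_difference_alt nums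
instance (nums : List Int) (out : Int) : Decidable (Spec_even_difference nums out) := by unfold Spec_even_difference; infer_instance

-- ===== CLAIM (what is proved, stated in full; the proofs are below) =====
def Claim_equal_even_difference : Prop := ∀ (nums : List Int), Dom_even_difference nums → Spec_even_difference nums (even_difference nums)

-- ===== LEMMAS AND PROOFS =====

lemma stepA_even (acc : List Int) (n : Int) (h : (2:Int) ∣ n) : pvStepA acc n = acc ++ [n] := by
  simp [pvStepA, h]

lemma stepA_odd (acc : List Int) (n : Int) (h : ¬ (2:Int) ∣ n) : pvStepA acc n = acc := by
  simp [pvStepA, h]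

lemma stepB_even0 (b w n : Int) (h : (2:Int) ∣ n) : pvStepB (0, b, w) n = (1, n, n) := by
  simp [pvStepB, h]

lemma stepB_even (c b w n : Int) (hc : ¬ c = 0) (h : (2:Int) ∣ n) :
    pvStepB (c, b, w) n = (c + 1, max b n, min w n) := by
  simp [pvStepB, h, hc]

lemma stepB_odd (c b w n : Int) (h : ¬ (2:Int) ∣ n) : pvStepB (c, b, w) n = (c, b, w) := by
  simp [pvStepB, h]

-- Invariant: B's fold state mirrors the length / running max / running min of A's evens list.
lemma pv_inv (nums : List Int) : ∀ (acc : List Int) (c b w : Int),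
    c = (acc.length : Int) →
    (∀ x t, acc = x :: t → b = t.foldl max x ∧ w = t.foldl min x) →
    (nums.foldl pvStepB (c, b, w)).1 = ((nums.foldl pvStepA acc).length : Int) ∧
    (∀ x t, nums.foldl pvStepA acc = x :: t →
      (nums.foldl pvStepB (c, b, w)).2.1 = t.foldl max x ∧
      (nums.foldl pvStepB (c, b, w)).2.2 = t.foldl min x) := by
  induction nums with
  | nil => intro acc c b w hc hm; exact ⟨hc, hm⟩
  | cons n rest ih =>
    intro acc c b w hc hm
    simp only [List.foldl_cons]
    by_cases he : (2:Int) ∣ n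
    · -- even element: A appends, B updates count/best/worst
      cases acc with
      | nil =>
        have hc0 : c = 0 := by simpa using hc
        rw [hc0, stepB_even0 b w n he, stepA_even [] n he]
        exact ih [n] 1 n n (by simp) (by intro x t hxt; cases hxt; simp)
      | cons x t =>
        obtain ⟨hb, hw⟩ := hm x t rfl
        have hcne : ¬ c = 0 := by simp only [hc]; simp; omega
        rw [stepB_even c b w n hcne he, stepA_even (x :: t) n he]
        rw [show x :: t ++ [n] = x :: (t ++ [n]) by simp]
        refine ih (x :: (t ++ [n])) (c + 1) (max b n) (min w n) ?_ ?_
        · simp [hc]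
        · intro y s hys
          injection hys with h1 h2
          subst h1; subst h2
          constructor
          · rw [List.foldl_append]; simp [hb]
          · rw [List.foldl_append]; simp [hw]
    · -- odd element: both sides skip it
      rw [stepB_odd c b w n he, stepA_odd acc n he]
      exact ih acc c b w hc hm

-- ===== VERDICT (by name: the statement is the Claim_ definition above) =====
theorem even_difference_spec : Claim_equal_even_difference := by
  intro nums _
  unfold Spec_even_difference even_difference even_difference_alt
  obtain ⟨h1, h2⟩ := pv_inv nums [] 0 0 0 (by simp) (by intro x t h; cases h)
  simp only
  generalize hE : nums.foldl pvStepA [] = evens at h1 h2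
  generalize hS : nums.foldl pvStepB ((0:Int), (0:Int), (0:Int)) = st at h1 h2
  by_cases hlen : evens.length < 2
  · have : st.1 < 2 := by rw [h1]; exact_mod_cast hlen
    simp [hlen, this]
  · have hge : ¬ st.1 < 2 := by rw [h1]; exact_mod_cast hlen
    cases evens with
    | nil => simp at hlen
    | cons x t =>
      obtain ⟨hb, hw⟩ := h2 x t rfl
      rw [if_neg hlen, if_neg hge]
      rw [PySem.List.max?_id_cons, PySem.List.min?_id_cons]
      simp [hb, hw]
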